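-- pv_equiv track=rewrite | github.com/jguzauckas/advent-of-code | 2024/Python/02.py | report_levels_remove
-- ===== SOURCE A (Python) =====
-- def report_levels_gap_check(report):
--     for level_1, level_2 in zip(report, report[1:]):
--         diff = abs(level_2 - level_1)
--         if diff < 1 or diff > 3:
--             return False
--     return True
--
-- def report_levels_remove(report):
--     potential_removals = []
--     for index, elem in enumerate(report):
--         report_copy = report.copy()
--         report_copy.pop(index)
--         if report_levels_gap_check(report_copy):
--             potential_removals.append(index)
--     return potential_removals
-- ===== SOURCE B (Python) =====
-- def report_levels_remove(report):
--     n = len(report)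
--     # suf[j]: all adjacent gaps within report[j:] are valid (1..3 in absolute value)
--     suf = [True] * (n + 1)
--     for j in range(n - 2, -1, -1):
--         suf[j] = suf[j + 1] and 1 <= abs(report[j + 1] - report[j]) <= 3
--     res = []
--     pref = True  # all adjacent gaps within report[:i] are valid
--     for i in range(n):
--         if i >= 2:
--             pref = pref and 1 <= abs(report[i - 1] - report[i - 2]) <= 3
--         bridge = i == 0 or i == n - 1 or 1 <= abs(report[i + 1] - report[i - 1]) <= 3
--         if pref and bridge and suf[i + 1]:
--             res.append(i)
--     return res
-- ===== Notes on version B (the rewrite author's own statement) =====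
-- stated objective: faster
-- what changed: A re-scans the whole remaining list after deleting each index (O(n) gap checks per index); B precomputes suffix-validity flags in one right-to-left pass and then decides each removal in O(1) from a running prefix flag, the bridge pair (i-1,i+1) and the suffix flag.
import Mathlib
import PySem

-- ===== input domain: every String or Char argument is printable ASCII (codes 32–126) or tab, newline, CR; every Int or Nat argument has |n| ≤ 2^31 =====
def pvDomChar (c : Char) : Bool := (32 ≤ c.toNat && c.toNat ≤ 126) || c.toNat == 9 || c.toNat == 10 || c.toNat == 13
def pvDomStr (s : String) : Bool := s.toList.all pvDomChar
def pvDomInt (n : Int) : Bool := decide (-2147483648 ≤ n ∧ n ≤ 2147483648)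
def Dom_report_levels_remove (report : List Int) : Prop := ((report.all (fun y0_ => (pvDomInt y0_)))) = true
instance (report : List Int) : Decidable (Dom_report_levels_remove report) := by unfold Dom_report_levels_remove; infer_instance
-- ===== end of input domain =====

-- B replaces A's O(n^2) "re-scan the whole list after each removal" with one O(n) pass using
-- precomputed suffix-validity flags, a running prefix flag and the single bridge pair (faster, asymptotic).

-- ===== PORT A =====
def pvGapLoop : List (Int × Int) → Bool
  | [] => true
  | (level_1, level_2) :: rest =>
      let diff := |level_2 - level_1|
      if diff < 1 ∨ diff > 3 then false else pvGapLoop rest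

def report_levels_gap_check (report : List Int) : Bool :=
  pvGapLoop (report.zip (PySem.List.slice report (some 1) none))

def report_levels_remove (report : List Int) : List Int :=
  (PySem.List.enumerate report 0).foldl
    (fun potential_removals p =>
      -- report_copy = report.copy(); report_copy.pop(index) — index is a valid non-negative index
      let report_copy := report.eraseIdx p.1.toNat
      if report_levels_gap_check report_copy then potential_removals ++ [p.1]
      else potential_removals) []

-- ===== PORT B =====
def report_levels_remove_alt (report : List Int) : List Int :=
  let n := report.length
  -- suf[j] == all adjacent gaps within report[j:] are valid (all indices below are in range)
  let suf := (PySem.List.pyRange ((n : Int) - 2) (-1) (-1)).foldl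
    (fun suf j =>
      let d := report.getD (j.toNat + 1) 0 - report.getD j.toNat 0
      suf.set j.toNat (suf.getD (j.toNat + 1) true && decide (1 ≤ |d| ∧ |d| ≤ 3)))
    (List.replicate (n + 1) true)
  let st := (List.range n).foldl
    (fun (st : List Int × Bool) i =>
      let pref := if 2 ≤ i then
          let d := report.getD (i - 1) 0 - report.getD (i - 2) 0
          st.2 && decide (1 ≤ |d| ∧ |d| ≤ 3)
        else st.2
      let bd := report.getD (i + 1) 0 - report.getD (i - 1) 0
      let bridge := i == 0 || i == n - 1 || decide (1 ≤ |bd| ∧ |bd| ≤ 3)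
      (if pref && bridge && suf.getD (i + 1) true then st.1 ++ [(i : Int)] else st.1, pref))
    ([], true)
  st.1

-- ===== PRECONDITION & SPEC =====
def Spec_report_levels_remove (report : List Int) (out : List Int) : Prop := out = report_levels_remove_alt report
instance (report : List Int) (out : List Int) : Decidable (Spec_report_levels_remove report out) := by unfold Spec_report_levels_remove; infer_instance

-- ===== CLAIM (what is proved, stated in full; the proofs are below) =====
def Claim_equal_report_levels_remove : Prop := ∀ (report : List Int), Dom_report_levels_remove report → Spec_report_levels_remove report (report_levels_remove report)

-- ===== LEMMAS AND PROOFS =====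

/-- one valid gap -/
def pairOk (a b : Int) : Bool := decide (1 ≤ |b - a| ∧ |b - a| ≤ 3)

/-- all adjacent gaps valid (reference predicate) -/
def chk : List Int → Bool
  | a :: b :: t => pairOk a b && chk (b :: t)
  | _ => true

/-- bridge condition between a left block and a right block -/
def pvBr : Option Int → Option Int → Bool
  | some a, some b => pairOk a b
  | _, _ => true

theorem chk_short (l : List Int) (h : l.length ≤ 1) : chk l = true := by
  match l, h with
  | [], _ => rfl
  | [a], _ => rfl

theorem gap_eq (xs : List Int) : report_levels_gap_check xs = chk xs := by
  unfold report_levels_gap_check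
  rw [PySem.List.slice_from_one]
  induction xs with
  | nil => rfl
  | cons a t ih =>
    cases t with
    | nil => rfl
    | cons b t' =>
      show pvGapLoop ((a, b) :: (b :: t').zip t') = chk (a :: b :: t')
      have ht : (b :: t').zip t' = (b :: t').zip (b :: t').tail := rfl
      have hstep : pvGapLoop ((a, b) :: (b :: t').zip t') =
          (pairOk a b && pvGapLoop ((b :: t').zip t')) := by
        show (if |b - a| < 1 ∨ |b - a| > 3 then false else pvGapLoop ((b :: t').zip t')) = _
        by_cases h : |b - a| < 1 ∨ |b - a| > 3
        · have hp : pairOk a b = false := by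
            simp only [pairOk, decide_eq_false_iff_not]
            simp only [Int.abs_eq_natAbs] at h ⊢
            omega
          rw [if_pos h, hp, Bool.false_and]
        · have hp : pairOk a b = true := by
            simp only [pairOk, decide_eq_true_eq]
            simp only [Int.abs_eq_natAbs] at h ⊢
            omega
          rw [if_neg h, hp, Bool.true_and]
      rw [hstep, ht, ih]
      rfl

theorem chk_append (l r : List Int) :
    chk (l ++ r) = (chk l && pvBr l.getLast? r.head? && chk r) := by
  induction l with
  | nil => simp [chk, pvBr]
  | cons a t ih =>
    cases t with
    | nil =>
      cases r with
      | nil => simp [chk, pvBr]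
      | cons b t' => simp [chk, pvBr]
    | cons b t' =>
      show chk (a :: b :: (t' ++ r)) = _
      rw [show chk (a :: b :: (t' ++ r)) = (pairOk a b && chk (b :: (t' ++ r))) from rfl]
      rw [show (b :: (t' ++ r)) = (b :: t') ++ r from rfl, ih]
      simp [chk, Bool.and_assoc]

theorem getLast?_take (report : List Int) (k : Nat) (h1 : 1 ≤ k) (h2 : k ≤ report.length) :
    (report.take k).getLast? = some (report.getD (k - 1) 0) := by
  conv_lhs => rw [show k = (k - 1) + 1 by omega]
  rw [List.take_add_one]
  have h : report[k - 1]? = some (report.getD (k - 1) 0) := by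
    rw [List.getD_eq_getElem report 0 (show k - 1 < report.length by omega)]
    exact List.getElem?_eq_getElem _
  rw [h]
  simp

theorem chk_take (report : List Int) (i : Nat) (h2 : 2 ≤ i) (hn : i ≤ report.length) :
    chk (report.take i) =
      (chk (report.take (i - 1)) && pairOk (report.getD (i - 2) 0) (report.getD (i - 1) 0)) := by
  conv_lhs => rw [show i = (i - 1) + 1 by omega, List.take_add_one]
  have h1 : report[i - 1]? = some (report.getD (i - 1) 0) := by
    rw [List.getD_eq_getElem report 0 (show i - 1 < report.length by omega)]
    exact List.getElem?_eq_getElem _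
  rw [h1, show (some (report.getD (i - 1) 0)).toList = [report.getD (i - 1) 0] from rfl,
      chk_append, getLast?_take report (i - 1) (by omega) (by omega),
      show i - 1 - 1 = i - 2 by omega]
  simp [pvBr, chk]

theorem chk_drop (report : List Int) (j : Nat) (h : j + 1 < report.length) :
    chk (report.drop j) =
      (pairOk (report.getD j 0) (report.getD (j + 1) 0) && chk (report.drop (j + 1))) := by
  have e1 : report.drop j = report.getD j 0 :: report.drop (j + 1) := by
    rw [List.getD_eq_getElem report 0 (show j < report.length by omega)]
    exact List.drop_eq_getElem_cons _
  have e2 : report.drop (j + 1) = report.getD (j + 1) 0 :: report.drop (j + 2) := by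
    rw [List.getD_eq_getElem report 0 h]
    exact List.drop_eq_getElem_cons _
  conv_lhs => rw [e1, e2]
  rw [show chk (report.getD j 0 :: report.getD (j + 1) 0 :: report.drop (j + 2)) =
      (pairOk (report.getD j 0) (report.getD (j + 1) 0) &&
        chk (report.getD (j + 1) 0 :: report.drop (j + 2))) from rfl, ← e2]

theorem cond_eq (report : List Int) (i : Nat) (hi : i < report.length) :
    chk (report.eraseIdx i) =
      (chk (report.take i) &&
       ((i == 0) || (i == report.length - 1) ||
         pairOk (report.getD (i - 1) 0) (report.getD (i + 1) 0)) &&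
       chk (report.drop (i + 1))) := by
  rw [List.eraseIdx_eq_take_drop_succ, chk_append]
  congr 2
  by_cases h0 : i = 0
  · subst h0; simp [pvBr]
  · by_cases hl : i = report.length - 1
    · have hge : report.length ≤ i + 1 := by omega
      rw [List.head?_drop, List.getElem?_eq_none hge]
      have hb : pvBr (report.take i).getLast? none = true := by
        cases (report.take i).getLast? <;> rfl
      rw [hb]
      simp [hl]
    · have hi1 : i + 1 < report.length := by omega
      have hh : (report.drop (i + 1)).head? = some (report.getD (i + 1) 0) := by
        rw [List.head?_drop, List.getD_eq_getElem report 0 hi1]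
        exact List.getElem?_eq_getElem _
      rw [hh, getLast?_take report i (by omega) (by omega)]
      have e0 : (i == 0) = false := by simp [h0]
      have e1 : (i == report.length - 1) = false := by simp [hl]
      rw [e0, e1]
      simp only [Bool.false_or, pvBr]

-- the suffix-array loop of B: after processing the first m indices (n-2 down to n-1-m),
-- every position j ≥ n-1-m holds chk (report.drop j)
theorem suf_loop (report : List Int) (m : Nat) (hm : m ≤ report.length - 1) :
    (((List.range m).map (fun (k : Nat) => ((report.length : Int) - 2 - (k : Int)))).foldl
        (fun suf (jj : Int) =>
          let d := report.getD (jj.toNat + 1) 0 - report.getD jj.toNat 0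
          suf.set jj.toNat (suf.getD (jj.toNat + 1) true && decide (1 ≤ |d| ∧ |d| ≤ 3)))
        (List.replicate (report.length + 1) true)).length = report.length + 1 ∧
    (∀ j, j ≤ report.length → report.length - 1 - m ≤ j →
      (((List.range m).map (fun (k : Nat) => ((report.length : Int) - 2 - (k : Int)))).foldl
        (fun suf (jj : Int) =>
          let d := report.getD (jj.toNat + 1) 0 - report.getD jj.toNat 0
          suf.set jj.toNat (suf.getD (jj.toNat + 1) true && decide (1 ≤ |d| ∧ |d| ≤ 3)))
        (List.replicate (report.length + 1) true)).getD j true = chk (report.drop j)) := by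
  induction m with
  | zero =>
    simp only [List.range_zero, List.map_nil, List.foldl_nil]
    refine ⟨by simp, ?_⟩
    intro j hj hge
    rw [List.getD_eq_getElem _ _ (by simp; omega), List.getElem_replicate]
    exact (chk_short _ (by simp; omega)).symm
  | succ m ih =>
    obtain ⟨ihlen, ihval⟩ := ih (by omega)
    rw [List.range_succ, List.map_append, List.foldl_append]
    set A := ((List.range m).map (fun (k : Nat) => ((report.length : Int) - 2 - (k : Int)))).foldl
        (fun suf (jj : Int) =>
          let d := report.getD (jj.toNat + 1) 0 - report.getD jj.toNat 0
          suf.set jj.toNat (suf.getD (jj.toNat + 1) true && decide (1 ≤ |d| ∧ |d| ≤ 3)))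
        (List.replicate (report.length + 1) true) with hA
    simp only [List.map_cons, List.map_nil, List.foldl_cons, List.foldl_nil]
    have htn : (((report.length : Int) - 2 - m)).toNat = report.length - 2 - m := by omega
    rw [htn]
    set i0 := report.length - 2 - m with hi0
    have hi0lt : i0 < report.length + 1 := by omega
    constructor
    · rw [List.length_set, ihlen]
    · intro j hj hge
      by_cases hji : j = i0
      · subst hji
        rw [List.getD_eq_getElem?_getD, List.getElem?_set_self (by rw [ihlen]; exact hi0lt)]
        simp only [Option.getD_some]
        have hread : A.getD (i0 + 1) true = chk (report.drop (i0 + 1)) :=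
          ihval (i0 + 1) (by omega) (by omega)
        rw [hread]
        have hlt : i0 + 1 < report.length := by omega
        rw [chk_drop report i0 hlt]
        simp [pairOk, Bool.and_comm]
      · rw [List.getD_eq_getElem?_getD, List.getElem?_set_ne (fun h => hji h.symm),
            ← List.getD_eq_getElem?_getD]
        exact ihval j hj (by omega)

theorem suf_getD (report : List Int) (j : Nat) (hj : j ≤ report.length) :
    ((PySem.List.pyRange ((report.length : Int) - 2) (-1) (-1)).foldl
      (fun suf (jj : Int) =>
        let d := report.getD (jj.toNat + 1) 0 - report.getD jj.toNat 0
        suf.set jj.toNat (suf.getD (jj.toNat + 1) true && decide (1 ≤ |d| ∧ |d| ≤ 3)))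
      (List.replicate (report.length + 1) true)).getD j true = chk (report.drop j) := by
  rw [PySem.List.pyRange_neg_one]
  have h1 : ((report.length : Int) - 2 - (-1)).toNat = report.length - 1 := by omega
  rw [h1]
  exact (suf_loop report (report.length - 1) le_rfl).2 j hj (by omega)

-- the main loop of B, with the suffix array abstracted by its specification
theorem B_loop (report : List Int) (suf : List Bool)
    (hsuf : ∀ j, j ≤ report.length → suf.getD j true = chk (report.drop j)) :
    ∀ (k s : Nat) (res : List Int), s + k = report.length →
    ((List.range' s k).foldl
      (fun (st : List Int × Bool) i =>
        let pref := if 2 ≤ i then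
            let d := report.getD (i - 1) 0 - report.getD (i - 2) 0
            st.2 && decide (1 ≤ |d| ∧ |d| ≤ 3)
          else st.2
        let bd := report.getD (i + 1) 0 - report.getD (i - 1) 0
        let bridge := i == 0 || i == report.length - 1 || decide (1 ≤ |bd| ∧ |bd| ≤ 3)
        (if pref && bridge && suf.getD (i + 1) true then st.1 ++ [(i : Int)] else st.1, pref))
      (res, chk (report.take (s - 1)))).1
    = res ++ ((List.range' s k).filter (fun i => chk (report.eraseIdx i))).map
        (fun (i : Nat) => (i : Int)) := by
  intro k
  induction k with
  | zero => intro s res _; simp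
  | succ k ih =>
    intro s res hsk
    rw [List.range'_succ, List.foldl_cons, List.filter_cons]
    have hs : s < report.length := by omega
    -- the updated prefix flag is chk (report.take s)
    have hpref : (if 2 ≤ s then
        let d := report.getD (s - 1) 0 - report.getD (s - 2) 0
        chk (report.take (s - 1)) && decide (1 ≤ |d| ∧ |d| ≤ 3)
      else chk (report.take (s - 1))) = chk (report.take s) := by
      by_cases h2 : 2 ≤ s
      · rw [if_pos h2]
        rw [chk_take report s h2 (by omega)]
        simp [pairOk]
      · rw [if_neg h2]
        rw [chk_short _ (by simp; omega), chk_short _ (by simp; omega)]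
    -- the appended-or-not condition is A's condition
    have hcond : (chk (report.take s) &&
        ((s == 0) || (s == report.length - 1) ||
          decide (1 ≤ |report.getD (s + 1) 0 - report.getD (s - 1) 0| ∧
                  |report.getD (s + 1) 0 - report.getD (s - 1) 0| ≤ 3)) &&
        suf.getD (s + 1) true) = chk (report.eraseIdx s) := by
      rw [hsuf (s + 1) (by omega), cond_eq report s hs]
      simp [pairOk]
    simp only [hpref, hcond]
    by_cases hc : chk (report.eraseIdx s) = true
    · rw [if_pos hc, if_pos hc]
      have := ih (s + 1) (res ++ [(s : Int)]) (by omega)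
      rw [show s + 1 - 1 = s by omega] at this
      rw [this]
      simp
    · rw [if_neg hc, if_neg hc]
      have := ih (s + 1) res (by omega)
      rw [show s + 1 - 1 = s by omega] at this
      rw [this]

theorem report_levels_remove_spec' (report : List Int) :
    report_levels_remove report = report_levels_remove_alt report := by
  -- A's side: collect the indices whose removal passes the gap check
  have hA : report_levels_remove report =
      ((List.range report.length).filter (fun i => chk (report.eraseIdx i))).map
        (fun (i : Nat) => (i : Int)) := by
    unfold report_levels_remove
    rw [show (fun (potential_removals : List Int) (p : Int × Int) =>
        let report_copy := report.eraseIdx p.1.toNat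
        if report_levels_gap_check report_copy then potential_removals ++ [p.1]
        else potential_removals) =
      (fun acc p => if (fun (q : Int × Int) =>
          report_levels_gap_check (report.eraseIdx q.1.toNat)) p then acc ++ [(fun (q : Int × Int) => q.1) p] else acc) from rfl]
    rw [PySem.List.foldl_append_if]
    rw [PySem.List.enumerate_eq_map_pyRange report 0, PySem.List.len]
    rw [List.filter_map, List.map_map, PySem.List.pyRange_zero_natCast, List.filter_map,
        List.map_map]
    simp only [List.nil_append, Function.comp_def, gap_eq, Int.toNat_natCast]
  rw [hA]
  -- B's side
  unfold report_levels_remove_alt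
  simp only []
  rw [show List.range report.length = List.range' 0 report.length from List.range_eq_range']
  exact (B_loop report _ (fun j hj => suf_getD report j hj) report.length 0 [] (by omega)).symm

-- ===== VERDICT (by name: the statement is the Claim_ definition above) =====
theorem report_levels_remove_spec : Claim_equal_report_levels_remove := by
  intro report _
  unfold Spec_report_levels_remove
  exact report_levels_remove_spec' report
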